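-- pv_equiv track=rewrite | github.com/KisloTAooAnkit/Python-Programs | second.py | solve
-- ===== SOURCE A (Python) =====
-- def isValid(diff,val,low,high):
--     a = 0
--     for i in range(len(diff)):
--         a = diff[i] + val
--         if a < low:
--             return 0
--         if a > high:
--             return 1
--         val = a
--     return 2
--
-- def solve(diff,low,high):
--
--     leftAns = None
--     start = low
--     end = high
--     while(start<=end):
--         mid = (start+end)//2
--         r = isValid(diff,mid,low,high)
--         if r ==2:
--             end = mid-1
--             leftAns = mid
--         elif r == 1:
--             end = mid -1
--         else:
--             start = mid+1
--     rightAns = None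
--     start = low
--     end = high
--     while(start<=end):
--         mid = (start+end)//2
--         r = isValid(diff,mid,low,high)
--         if r == 2:
--             start = mid+1
--             rightAns = mid
--         elif r == 1:
--             end = mid -1
--         else:
--             start = mid+1
--     if leftAns == None or rightAns == None:
--         return 0
--     return rightAns - leftAns   + 1
-- ===== SOURCE B (Python) =====
-- def solve(diff, low, high):
--     s = 0
--     mn = 0
--     mx = 0
--     for d in diff:
--         s += d
--         mn = min(mn, s)
--         mx = max(mx, s)
--         if mx - mn > high - low:
--             return 0
--     return max(0, (high - mx) - (low - mn) + 1)
-- ===== Notes on version B (the rewrite author's own statement) =====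
-- stated objective: alternative
-- what changed: Replaced the two binary searches over [low,high] (each repeatedly re-simulating the prefix-sum walk) with a single pass that tracks the prefix-sum minimum and maximum, exits early once their spread exceeds the window, and derives the count of valid start values arithmetically.
import Mathlib
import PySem

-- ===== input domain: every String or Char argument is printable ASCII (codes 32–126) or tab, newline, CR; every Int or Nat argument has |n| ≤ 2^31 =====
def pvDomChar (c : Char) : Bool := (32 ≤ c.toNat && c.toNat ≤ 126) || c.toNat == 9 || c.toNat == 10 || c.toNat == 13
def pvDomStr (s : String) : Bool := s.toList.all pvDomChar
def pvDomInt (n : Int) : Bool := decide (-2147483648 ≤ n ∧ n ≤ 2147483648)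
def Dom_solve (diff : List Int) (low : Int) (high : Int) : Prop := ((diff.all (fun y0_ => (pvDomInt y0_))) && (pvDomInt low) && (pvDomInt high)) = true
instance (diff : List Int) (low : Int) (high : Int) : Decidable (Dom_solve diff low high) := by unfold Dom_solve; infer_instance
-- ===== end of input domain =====

-- B replaces A's two binary searches by one early-exiting prefix-sum min/max pass and an arithmetic count (objective: alternative).

-- ===== PORT A =====
-- isValid: walk the prefix sums starting at val; 0 = fell below low, 1 = rose above high, 2 = stayed in range.
def isValid (diff : List Int) (val : Int) (low : Int) (high : Int) : Int :=
  match diff with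
  | [] => 2
  | d :: rest =>
    let a := d + val
    if a < low then 0
    else if a > high then 1
    else isValid rest a low high

-- first while-loop of A: binary search for the leftmost valid start value
def leftLoop (diff : List Int) (low : Int) (high : Int) (start e : Int) (leftAns : Option Int) : Option Int :=
  if h : start ≤ e then
    let mid := PySem.Int.floordiv (start + e) 2
    let r := isValid diff mid low high
    if r = 2 then leftLoop diff low high start (mid - 1) (some mid)
    else if r = 1 then leftLoop diff low high start (mid - 1) leftAns
    else leftLoop diff low high (mid + 1) e leftAns
  else leftAns
  termination_by (e - start + 1).toNat
  decreasing_by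
    all_goals
      have hb := PySem.Int.floordiv_two_mid_bounds h
      omega

-- second while-loop of A: binary search for the rightmost valid start value
def rightLoop (diff : List Int) (low : Int) (high : Int) (start e : Int) (rightAns : Option Int) : Option Int :=
  if h : start ≤ e then
    let mid := PySem.Int.floordiv (start + e) 2
    let r := isValid diff mid low high
    if r = 2 then rightLoop diff low high (mid + 1) e (some mid)
    else if r = 1 then rightLoop diff low high start (mid - 1) rightAns
    else rightLoop diff low high (mid + 1) e rightAns
  else rightAns
  termination_by (e - start + 1).toNat
  decreasing_by
    all_goals
      have hb := PySem.Int.floordiv_two_mid_bounds h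
      omega

def solve (diff : List Int) (low : Int) (high : Int) : Int :=
  let leftAns := leftLoop diff low high low high none
  let rightAns := rightLoop diff low high low high none
  match leftAns, rightAns with
  | some l, some r => r - l + 1
  | _, _ => 0

-- ===== PORT B =====
-- B's loop: track running sum and its min/max; stop early once the spread exceeds the window
def altLoop (diff : List Int) (low : Int) (high : Int) (s mn mx : Int) : Int :=
  match diff with
  | [] => max 0 ((high - mx) - (low - mn) + 1)
  | d :: rest =>
    let s' := s + d
    let mn' := min mn s'
    let mx' := max mx s'
    if mx' - mn' > high - low then 0 else altLoop rest low high s' mn' mx'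

def solve_alt (diff : List Int) (low : Int) (high : Int) : Int :=
  altLoop diff low high 0 0 0

-- ===== PRECONDITION & SPEC =====
def Spec_solve (diff : List Int) (low : Int) (high : Int) (out : Int) : Prop := out = solve_alt diff low high
instance (diff : List Int) (low : Int) (high : Int) (out : Int) : Decidable (Spec_solve diff low high out) := by unfold Spec_solve; infer_instance

-- ===== CLAIM (what is proved, stated in full; the proofs are below) =====
def Claim_equal_solve : Prop := ∀ (diff : List Int) (low : Int) (high : Int), Dom_solve diff low high → Spec_solve diff low high (solve diff low high)

-- ===== LEMMAS AND PROOFS =====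

-- (pm l v) = (min, max) of {v + S : S a prefix sum of l, including the empty prefix}
def pm (l : List Int) (v : Int) : Int × Int :=
  match l with
  | [] => (v, v)
  | d :: rest =>
    let p := pm rest (d + v)
    (min v p.1, max v p.2)

theorem pm_bounds (l : List Int) (v : Int) : (pm l v).1 ≤ v ∧ v ≤ (pm l v).2 := by
  cases l with
  | nil => simp [pm]
  | cons d rest => simp [pm]

theorem pm_shift (l : List Int) (v c : Int) : pm l (v + c) = ((pm l v).1 + c, (pm l v).2 + c) := by
  induction l generalizing v with
  | nil => simp [pm]
  | cons d rest ih =>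
    have hrec := ih (d + v)
    simp only [pm, Prod.mk.injEq]
    rw [show d + (v + c) = d + v + c by ring, hrec]
    constructor
    · show min (v + c) ((pm rest (d + v)).1 + c) = min v (pm rest (d + v)).1 + c
      apply min_add_add_right
    · show max (v + c) ((pm rest (d + v)).2 + c) = max v (pm rest (d + v)).2 + c
      apply max_add_add_right

theorem isValid_trichotomy (diff : List Int) (val low high : Int) :
    isValid diff val low high = 0 ∨ isValid diff val low high = 1 ∨ isValid diff val low high = 2 := by
  induction diff generalizing val with
  | nil => simp [isValid]
  | cons d rest ih =>
    simp only [isValid]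
    split_ifs with h1 h2
    · left; rfl
    · right; left; rfl
    · exact ih (d + val)

theorem isValid_eq_two (diff : List Int) (val low high : Int) (h1 : low ≤ val) (h2 : val ≤ high) :
    isValid diff val low high = 2 ↔ (low ≤ (pm diff val).1 ∧ (pm diff val).2 ≤ high) := by
  induction diff generalizing val with
  | nil =>
    simp only [isValid, pm]
    constructor
    · intro _; exact ⟨h1, h2⟩
    · intro _; trivial
  | cons d rest ih =>
    simp only [isValid, pm]
    have hb := pm_bounds rest (d + val)
    split_ifs with ha hc
    · constructor
      · intro h; omega
      · intro ⟨hl, _⟩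
        simp only [le_min_iff] at hl
        omega
    · constructor
      · intro h; omega
      · intro ⟨_, hr⟩
        simp only [max_le_iff] at hr
        omega
    · rw [ih (d + val) (by omega) (by omega)]
      simp only [le_min_iff, max_le_iff]
      constructor
      · intro ⟨hl, hr⟩; exact ⟨⟨h1, hl⟩, h2, hr⟩
      · intro ⟨hl, hr⟩; exact ⟨hl.2, hr.2⟩

theorem isValid_eq_zero (diff : List Int) (val low high : Int) :
    isValid diff val low high = 0 → (pm diff val).1 < low := by
  induction diff generalizing val with
  | nil => simp [isValid]
  | cons d rest ih =>
    simp only [isValid, pm]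
    have hb := pm_bounds rest (d + val)
    split_ifs with ha hc
    · intro _
      simp only [min_lt_iff]; omega
    · intro h; omega
    · intro h
      have := ih (d + val) h
      simp only [min_lt_iff]; omega

theorem isValid_eq_one (diff : List Int) (val low high : Int) :
    isValid diff val low high = 1 → high < (pm diff val).2 := by
  induction diff generalizing val with
  | nil => simp [isValid]
  | cons d rest ih =>
    simp only [isValid, pm]
    have hb := pm_bounds rest (d + val)
    split_ifs with ha hc
    · intro h; omega
    · intro _
      simp only [lt_max_iff]; omega
    · intro h
      have := ih (d + val) h
      simp only [lt_max_iff]; omega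

-- B's loop computes the window count from the running min/max; the early exit returns the same 0
theorem altLoop_eq (diff : List Int) (low high s0 mn0 mx0 : Int) (h1 : mn0 ≤ s0) (h2 : s0 ≤ mx0) :
    altLoop diff low high s0 mn0 mx0
    = max 0 ((high - max mx0 (pm diff s0).2) - (low - min mn0 (pm diff s0).1) + 1) := by
  induction diff generalizing s0 mn0 mx0 with
  | nil =>
    simp only [altLoop, pm]
    rw [min_eq_left h1, max_eq_left h2]
  | cons d rest ih =>
    simp only [altLoop, pm]
    rw [show d + s0 = s0 + d by ring]
    have hb := pm_bounds rest (s0 + d)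
    have hc1 : min mn0 (min s0 (pm rest (s0 + d)).1) ≤ min mn0 (s0 + d) :=
      le_min (min_le_left _ _)
        (le_trans (le_trans (min_le_right _ _) (min_le_right _ _)) hb.1)
    have hc2 : max mx0 (s0 + d) ≤ max mx0 (max s0 (pm rest (s0 + d)).2) :=
      max_le (le_max_left _ _)
        (le_trans hb.2 (le_trans (le_max_right _ _) (le_max_right _ _)))
    split_ifs with hearly
    · exact (max_eq_left (by omega)).symm
    · rw [ih (s0 + d) (min mn0 (s0 + d)) (max mx0 (s0 + d)) (min_le_right _ _) (le_max_right _ _)]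
      have e1 : min (min mn0 (s0 + d)) (pm rest (s0 + d)).1 = min mn0 (min s0 (pm rest (s0 + d)).1) := by
        rw [min_assoc, min_eq_right hb.1, ← min_assoc, min_eq_left h1]
      have e2 : max (max mx0 (s0 + d)) (pm rest (s0 + d)).2 = max mx0 (max s0 (pm rest (s0 + d)).2) := by
        rw [max_assoc, max_eq_right hb.2, ← max_assoc, max_eq_left h2]
      rw [e1, e2]

-- leftLoop finds the smallest element of [start,e] ∩ [lo,hi] (lo/hi the valid-start interval), else keeps ans
theorem leftLoop_eq (diff : List Int) (low high : Int) (lo hi : Int)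
    (hlo : lo = low - (pm diff 0).1) (hhi : hi = high - (pm diff 0).2) :
    ∀ (start e : Int) (ans : Option Int), low ≤ start → e ≤ high →
    leftLoop diff low high start e ans = if max start lo ≤ min e hi then some (max start lo) else ans := by
  intro start e ans
  induction start, e, ans using leftLoop.induct diff low high with
  | case1 start e ans h mid r h2 ih =>
    intro hs he
    have hmb := PySem.Int.floordiv_two_mid_bounds h
    rw [leftLoop]
    simp only [dif_pos h]
    rw [if_pos (show (isValid diff (PySem.Int.floordiv (start + e) 2) low high) = 2 from h2)]
    have hm2 := (isValid_eq_two diff mid low high (by omega) (by omega)).1 h2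
    have hpmv : pm diff mid = ((pm diff 0).1 + mid, (pm diff 0).2 + mid) := by
      have := pm_shift diff 0 mid
      simpa using this
    have hm2a : low ≤ (pm diff 0).1 + mid := by rw [hpmv] at hm2; exact hm2.1
    have hm2b : (pm diff 0).2 + mid ≤ high := by rw [hpmv] at hm2; exact hm2.2
    have hmid : mid = PySem.Int.floordiv (start + e) 2 := rfl
    have hmlo : lo ≤ mid := by omega
    have hmhi : mid ≤ hi := by omega
    rw [ih hs (by omega), min_eq_left (show (mid - 1 : Int) ≤ hi by omega)]
    have hme3 : mid ≤ min e hi := le_min (by omega) hmhi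
    have hms3 : max start lo ≤ mid := max_le (by omega) hmlo
    split_ifs with c1 c2 c2
    · rfl
    · exact absurd (show max start lo ≤ min e hi by omega) c2
    · exact congrArg some (by omega)
    · exact absurd (show max start lo ≤ min e hi by omega) c2
  | case2 start e ans h mid r h2 h1 ih =>
    intro hs he
    have hmb := PySem.Int.floordiv_two_mid_bounds h
    rw [leftLoop]
    simp only [dif_pos h]
    rw [if_neg (show ¬ (isValid diff (PySem.Int.floordiv (start + e) 2) low high) = 2 from h2),
        if_pos (show (isValid diff (PySem.Int.floordiv (start + e) 2) low high) = 1 from h1)]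
    have hm1 := isValid_eq_one diff mid low high h1
    have hpmv : pm diff mid = ((pm diff 0).1 + mid, (pm diff 0).2 + mid) := by
      have := pm_shift diff 0 mid
      simpa using this
    have hm1b : high < (pm diff 0).2 + mid := by rw [hpmv] at hm1; exact hm1
    have hmid : mid = PySem.Int.floordiv (start + e) 2 := rfl
    have hmhi : hi < mid := by omega
    rw [ih hs (by omega),
        min_eq_right (show hi ≤ mid - 1 by omega),
        min_eq_right (show hi ≤ e by omega)]
  | case3 start e ans h mid r h2 h1 ih =>
    intro hs he
    have hmb := PySem.Int.floordiv_two_mid_bounds h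
    rw [leftLoop]
    simp only [dif_pos h]
    rw [if_neg (show ¬ (isValid diff (PySem.Int.floordiv (start + e) 2) low high) = 2 from h2),
        if_neg (show ¬ (isValid diff (PySem.Int.floordiv (start + e) 2) low high) = 1 from h1)]
    have h0 : isValid diff mid low high = 0 := by
      rcases isValid_trichotomy diff mid low high with h' | h' | h'
      · exact h'
      · exact absurd h' h1
      · exact absurd h' h2
    have hm0 := isValid_eq_zero diff mid low high h0
    have hpmv : pm diff mid = ((pm diff 0).1 + mid, (pm diff 0).2 + mid) := by
      have := pm_shift diff 0 mid
      simpa using this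
    have hm0a : (pm diff 0).1 + mid < low := by rw [hpmv] at hm0; exact hm0
    have hmid : mid = PySem.Int.floordiv (start + e) 2 := rfl
    have hmlo : mid < lo := by omega
    rw [ih (by omega) he,
        max_eq_right (show (mid + 1 : Int) ≤ lo by omega),
        max_eq_right (show start ≤ lo by omega)]
  | case4 start e ans h =>
    intro hs he
    rw [leftLoop]
    simp only [dif_neg h]
    rw [if_neg (by omega)]

-- rightLoop finds the largest element of [start,e] ∩ [lo,hi], else keeps ans
theorem rightLoop_eq (diff : List Int) (low high : Int) (lo hi : Int)
    (hlo : lo = low - (pm diff 0).1) (hhi : hi = high - (pm diff 0).2) :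
    ∀ (start e : Int) (ans : Option Int), low ≤ start → e ≤ high →
    rightLoop diff low high start e ans = if max start lo ≤ min e hi then some (min e hi) else ans := by
  intro start e ans
  induction start, e, ans using rightLoop.induct diff low high with
  | case1 start e ans h mid r h2 ih =>
    intro hs he
    have hmb := PySem.Int.floordiv_two_mid_bounds h
    rw [rightLoop]
    simp only [dif_pos h]
    rw [if_pos (show (isValid diff (PySem.Int.floordiv (start + e) 2) low high) = 2 from h2)]
    have hm2 := (isValid_eq_two diff mid low high (by omega) (by omega)).1 h2
    have hpmv : pm diff mid = ((pm diff 0).1 + mid, (pm diff 0).2 + mid) := by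
      have := pm_shift diff 0 mid
      simpa using this
    have hm2a : low ≤ (pm diff 0).1 + mid := by rw [hpmv] at hm2; exact hm2.1
    have hm2b : (pm diff 0).2 + mid ≤ high := by rw [hpmv] at hm2; exact hm2.2
    have hmid : mid = PySem.Int.floordiv (start + e) 2 := rfl
    have hmlo : lo ≤ mid := by omega
    have hmhi : mid ≤ hi := by omega
    rw [ih (by omega) he, max_eq_left (show lo ≤ mid + 1 by omega)]
    have hme3 : mid ≤ min e hi := le_min (by omega) hmhi
    have hms3 : max start lo ≤ mid := max_le (by omega) hmlo
    split_ifs with c1 c2 c2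
    · rfl
    · exact absurd (show max start lo ≤ min e hi by omega) c2
    · exact congrArg some (by omega)
    · exact absurd (show max start lo ≤ min e hi by omega) c2
  | case2 start e ans h mid r h2 h1 ih =>
    intro hs he
    have hmb := PySem.Int.floordiv_two_mid_bounds h
    rw [rightLoop]
    simp only [dif_pos h]
    rw [if_neg (show ¬ (isValid diff (PySem.Int.floordiv (start + e) 2) low high) = 2 from h2),
        if_pos (show (isValid diff (PySem.Int.floordiv (start + e) 2) low high) = 1 from h1)]
    have hm1 := isValid_eq_one diff mid low high h1
    have hpmv : pm diff mid = ((pm diff 0).1 + mid, (pm diff 0).2 + mid) := by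
      have := pm_shift diff 0 mid
      simpa using this
    have hm1b : high < (pm diff 0).2 + mid := by rw [hpmv] at hm1; exact hm1
    have hmid : mid = PySem.Int.floordiv (start + e) 2 := rfl
    have hmhi : hi < mid := by omega
    rw [ih hs (by omega),
        min_eq_right (show hi ≤ mid - 1 by omega),
        min_eq_right (show hi ≤ e by omega)]
  | case3 start e ans h mid r h2 h1 ih =>
    intro hs he
    have hmb := PySem.Int.floordiv_two_mid_bounds h
    rw [rightLoop]
    simp only [dif_pos h]
    rw [if_neg (show ¬ (isValid diff (PySem.Int.floordiv (start + e) 2) low high) = 2 from h2),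
        if_neg (show ¬ (isValid diff (PySem.Int.floordiv (start + e) 2) low high) = 1 from h1)]
    have h0 : isValid diff mid low high = 0 := by
      rcases isValid_trichotomy diff mid low high with h' | h' | h'
      · exact h'
      · exact absurd h' h1
      · exact absurd h' h2
    have hm0 := isValid_eq_zero diff mid low high h0
    have hpmv : pm diff mid = ((pm diff 0).1 + mid, (pm diff 0).2 + mid) := by
      have := pm_shift diff 0 mid
      simpa using this
    have hm0a : (pm diff 0).1 + mid < low := by rw [hpmv] at hm0; exact hm0
    have hmid : mid = PySem.Int.floordiv (start + e) 2 := rfl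
    have hmlo : mid < lo := by omega
    rw [ih (by omega) he,
        max_eq_right (show (mid + 1 : Int) ≤ lo by omega),
        max_eq_right (show start ≤ lo by omega)]
  | case4 start e ans h =>
    intro hs he
    rw [rightLoop]
    simp only [dif_neg h]
    rw [if_neg (by omega)]

-- ===== VERDICT (by name: the statement is the Claim_ definition above) =====
theorem solve_spec : Claim_equal_solve := by
  intro diff low high _
  unfold Spec_solve solve solve_alt
  have hpb := pm_bounds diff 0
  rw [leftLoop_eq diff low high (low - (pm diff 0).1) (high - (pm diff 0).2) rfl rfl low high none le_rfl le_rfl,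
      rightLoop_eq diff low high (low - (pm diff 0).1) (high - (pm diff 0).2) rfl rfl low high none le_rfl le_rfl,
      altLoop_eq diff low high 0 0 0 le_rfl le_rfl]
  rw [max_eq_right (show low ≤ low - (pm diff 0).1 by omega),
      min_eq_right (show high - (pm diff 0).2 ≤ high by omega),
      min_eq_right (show (pm diff 0).1 ≤ 0 by omega),
      max_eq_right (show (0 : Int) ≤ (pm diff 0).2 by omega)]
  split_ifs with hc
  · simp only []
    omega
  · simp only []
    omega
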